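-- pv_equiv track=rewrite | github.com/wieerwill/advent_of_code_2023 | Day17/python/solution1.py | find_least_heat_loss
-- ===== SOURCE A (Python) =====
-- from heapq import heappush, heappop
--
-- DIRECTIONS = [(-1, 0), (1, 0), (0, -1), (0, 1)]
--
-- def is_valid_position(row, col, grid):
--     """
--     Checks if the given position is within the bounds of the grid.
--     """
--     return 0 <= row < len(grid) and 0 <= col < len(grid[0])
--
-- def find_least_heat_loss(grid):
--     """
--     Finds the path with the least heat loss in the given grid.
--     """
--     queue = [(0, 0, 0, 0, 0, 0)]  # heat_loss, row, col, dr, dc, n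
--     seen = set()
--
--     while queue:
--         heat_loss, row, col, dr, dc, n = heappop(queue)
--
--         # Check if destination is reached
--         if row == len(grid) - 1 and col == len(grid[0]) - 1:
--             return heat_loss
--
--         if (row, col, dr, dc, n) in seen:
--             continue
--
--         seen.add((row, col, dr, dc, n))
--
--         # Continue in the same direction if not moved more than 3 blocks
--         if n < 3 and (dr, dc) != (0, 0):
--             new_row, new_col = row + dr, col + dc
--             if is_valid_position(new_row, new_col, grid):
--                 heappush(
--                     queue,
--                     (
--                         heat_loss + grid[new_row][new_col],
--                         new_row,
--                         new_col,
--                         dr,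
--                         dc,
--                         n + 1,
--                     ),
--                 )
--
--         # Explore adjacent directions, avoiding immediate reversals
--         for new_dr, new_dc in DIRECTIONS:
--             if (new_dr, new_dc) in ((dr, dc), (-dr, -dc)):
--                 continue
--
--             new_row, new_col = row + new_dr, col + new_dc
--             if is_valid_position(new_row, new_col, grid):
--                 heappush(
--                     queue,
--                     (
--                         heat_loss + grid[new_row][new_col],
--                         new_row,
--                         new_col,
--                         new_dr,
--                         new_dc,
--                         1,
--                     ),
--                 )
--
--     return -1  # Return -1 if no path is found
-- ===== SOURCE B (Python) =====
-- def find_least_heat_loss(grid):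
--     """
--     Finds the path with the least heat loss in the given grid.
--     Selection-based Dijkstra: a dict of best-known heat per state and a visited
--     set replace the heap of duplicate entries; each round scans for the
--     unvisited state with the least (heat, state) and relaxes its moves once.
--     """
--     rows, cols = len(grid), len(grid[0])
--     dist = {(0, 0, 0, 0, 0): 0}  # (row, col, dr, dc, n) -> least heat known
--     visited = set()
--     while True:
--         best = None
--         for s, d in dist.items():
--             if s not in visited and (best is None or (d, s) < best):
--                 best = (d, s)
--         if best is None:
--             return -1
--         d, (row, col, dr, dc, n) = best
--         if row == rows - 1 and col == cols - 1:
--             return d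
--         visited.add((row, col, dr, dc, n))
--         for ndr, ndc in ((-1, 0), (1, 0), (0, -1), (0, 1)):
--             if (ndr, ndc) == (-dr, -dc):
--                 continue
--             if (ndr, ndc) == (dr, dc):
--                 if n >= 3:
--                     continue
--                 nn = n + 1
--             else:
--                 nn = 1
--             nr, nc = row + ndr, col + ndc
--             if not (0 <= nr < rows and 0 <= nc < cols):
--                 continue
--             t = (nr, nc, ndr, ndc, nn)
--             if t in visited:
--                 continue
--             nd = d + grid[nr][nc]
--             if t not in dist or nd < dist[t]:
--                 dist[t] = nd
-- ===== Notes on version B (the rewrite author's own statement) =====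
-- stated objective: alternative
-- what changed: Replaces the heap of duplicate (heat,row,col,dr,dc,n) entries with lazy seen-skipping by a selection-based Dijkstra: a dict keeps one best-known heat per state and a visited set, each round scans for the least unvisited (heat, state) and relaxes its moves once through a single unified direction loop (A's separate same-direction block and direction loop become one).
-- outside the precondition, e.g. on find_least_heat_loss([]): A returns -1, B raises IndexError; on find_least_heat_loss([[1], [1], [1], [1], []]): A returns -1, B returns -1
import Mathlib
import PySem

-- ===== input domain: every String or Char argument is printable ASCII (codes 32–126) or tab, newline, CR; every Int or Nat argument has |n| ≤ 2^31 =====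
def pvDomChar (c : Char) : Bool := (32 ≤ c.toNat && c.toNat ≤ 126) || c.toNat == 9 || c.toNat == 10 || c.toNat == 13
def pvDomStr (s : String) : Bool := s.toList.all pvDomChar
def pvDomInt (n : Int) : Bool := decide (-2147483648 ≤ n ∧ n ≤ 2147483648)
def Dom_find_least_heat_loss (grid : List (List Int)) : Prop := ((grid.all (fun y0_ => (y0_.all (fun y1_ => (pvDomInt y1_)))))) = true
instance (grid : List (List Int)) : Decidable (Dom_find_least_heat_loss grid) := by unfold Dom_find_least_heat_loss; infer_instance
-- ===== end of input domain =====

-- B replaces A's heap of duplicate (heat,row,col,dr,dc,n) entries and lazy seen-skipping by a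
-- selection-based Dijkstra (one best-known heat per state in a dict, a visited set, a scan for the
-- least unvisited (heat, state) each round, one unified direction loop); same return value, not faster.

-- Shared small helpers (both Pythons read cells / compare tuples the same way).
-- a state: (row, col, dr, dc, n)
abbrev PvS : Type := Int × Int × Int × Int × Int
-- a queue entry / selection candidate: (heat, row, col, dr, dc, n) = (heat, state)
abbrev PvE : Type := Int × PvS

-- Python tuple '<' on 6-tuples of ints: strict lexicographic order.
def pvLt6 (a b : PvE) : Bool :=
  decide (a.1 < b.1 ∨ (a.1 = b.1 ∧ (a.2.1 < b.2.1 ∨ (a.2.1 = b.2.1 ∧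
    (a.2.2.1 < b.2.2.1 ∨ (a.2.2.1 = b.2.2.1 ∧ (a.2.2.2.1 < b.2.2.2.1 ∨ (a.2.2.2.1 = b.2.2.2.1 ∧
    (a.2.2.2.2.1 < b.2.2.2.2.1 ∨ (a.2.2.2.2.1 = b.2.2.2.2.1 ∧
     a.2.2.2.2.2 < b.2.2.2.2.2))))))))))

-- grid[r][c]; both programs only evaluate it after their own 0 ≤ r < rows, 0 ≤ c < cols check and
-- inside Pre_ every admitted row has length ≥ len(grid[0]), so the defaults are never read there.
def pvCell (grid : List (List Int)) (r c : Int) : Int :=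
  PySem.List.pyGetD (PySem.List.pyGetD grid r []) c 0

-- len(grid[0]); Python raises on [] there — [] is outside Pre_ (the default [] is exact for A,
-- whose `0 <= row < len(grid)` short-circuits before len(grid[0]) on an empty grid).
def pvWidth (grid : List (List Int)) : Int := ((PySem.List.pyGetD grid 0 []).length : Int)

def pvDirs : List (Int × Int) := [(-1,0),(1,0),(0,-1),(0,1)]

-- state space used only to size the fuel of the two loops (both terminate within it)
def pvStates (grid : List (List Int)) : List PvS :=
  ((0:Int),(0:Int),(0:Int),(0:Int),(0:Int)) ::
    (PySem.List.pyRange 0 (grid.length : Int) 1).flatMap (fun r =>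
      (PySem.List.pyRange 0 (pvWidth grid) 1).flatMap (fun c =>
        pvDirs.flatMap (fun d =>
          (PySem.List.pyRange 1 4 1).map (fun n => (r, c, d.1, d.2, n)))))

-- ===== PORT A =====
def is_valid_position (row col : Int) (grid : List (List Int)) : Bool :=
  decide (0 ≤ row ∧ row < (grid.length : Int)) && decide (0 ≤ col ∧ col < pvWidth grid)

-- heapq is modelled by its observable contract: the queue is the multiset of pushed entries and
-- heappop removes a minimal entry under Python tuple order (ties are identical tuples).
def pvMinOf (q : List PvE) : Option PvE :=
  q.foldl (fun acc e =>
    match acc with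
    | none => some e
    | some m => if pvLt6 e m then some e else some m) none

-- the entries A pushes when expanding popped entry (h, s): the same-direction block, then the loop
def pvPushesA (grid : List (List Int)) (h : Int) (s : PvS) : List PvE :=
  (if s.2.2.2.2 < 3 ∧ ¬(s.2.2.1 = 0 ∧ s.2.2.2.1 = 0) then
     (if is_valid_position (s.1 + s.2.2.1) (s.2.1 + s.2.2.2.1) grid then
        [(h + pvCell grid (s.1 + s.2.2.1) (s.2.1 + s.2.2.2.1),
          s.1 + s.2.2.1, s.2.1 + s.2.2.2.1, s.2.2.1, s.2.2.2.1, s.2.2.2.2 + 1)]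
      else [])
   else []) ++
  pvDirs.foldl (fun acc d =>
    if (d.1 = s.2.2.1 ∧ d.2 = s.2.2.2.1) ∨ (d.1 = -s.2.2.1 ∧ d.2 = -s.2.2.2.1) then acc
    else if is_valid_position (s.1 + d.1) (s.2.1 + d.2) grid then
      acc ++ [(h + pvCell grid (s.1 + d.1) (s.2.1 + d.2), s.1 + d.1, s.2.1 + d.2, d.1, d.2, 1)]
    else acc) []

def pvLoopA (grid : List (List Int)) : Nat → List PvE → PySem.Set PvS → Int
  | 0, _, _ => -1   -- never reached: the fuel bounds the loop's iteration count (see the proofs)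
  | f+1, queue, seen =>
    match pvMinOf queue with
    | none => -1
    | some e =>
      let rest := queue.erase e
      if e.2.1 = (grid.length : Int) - 1 ∧ e.2.2.1 = pvWidth grid - 1 then e.1
      else if PySem.Set.contains seen e.2 then pvLoopA grid f rest seen
      else pvLoopA grid f (rest ++ pvPushesA grid e.1 e.2) (PySem.Set.add seen e.2)

def pvFuelA (grid : List (List Int)) : Nat := 2 + 6 * (pvStates grid).length

def find_least_heat_loss (grid : List (List Int)) : Int :=
  pvLoopA grid (pvFuelA grid) [(0, 0, 0, 0, 0, 0)] []

-- ===== PORT B =====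
-- dist[t] = nd after `if t in visited: continue / if t not in dist or nd < dist[t]: dist[t] = nd`
def pvBUpd (vis : PySem.Set PvS) (t : PvS) (nd : Int) (dist : PySem.Dict PvS Int) :
    PySem.Dict PvS Int :=
  if PySem.Set.contains vis t then dist
  else if ¬ dist.contains t ∨ nd < dist.getD t 0 then dist.insert t nd else dist

-- B's single direction loop relaxing the moves of selected state s at heat d
def pvRelax (grid : List (List Int)) (d : Int) (s : PvS) (vis : PySem.Set PvS)
    (dist : PySem.Dict PvS Int) : PySem.Dict PvS Int :=
  pvDirs.foldl (fun dist dd =>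
    if dd.1 = -s.2.2.1 ∧ dd.2 = -s.2.2.2.1 then dist
    else
      match (if dd.1 = s.2.2.1 ∧ dd.2 = s.2.2.2.1 then
               (if s.2.2.2.2 ≥ 3 then none else some (s.2.2.2.2 + 1))
             else some 1 : Option Int) with
      | none => dist
      | some nn =>
        if 0 ≤ s.1 + dd.1 ∧ s.1 + dd.1 < (grid.length : Int) ∧
           0 ≤ s.2.1 + dd.2 ∧ s.2.1 + dd.2 < pvWidth grid then
          pvBUpd vis (s.1 + dd.1, s.2.1 + dd.2, dd.1, dd.2, nn)
            (d + pvCell grid (s.1 + dd.1) (s.2.1 + dd.2)) dist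
        else dist) dist

-- `best = min over dist.items of (d, s) with s unvisited` (None when all are visited)
def pvBestOf (dist : PySem.Dict PvS Int) (vis : PySem.Set PvS) : Option PvE :=
  dist.items.foldl (fun best p =>
    if PySem.Set.contains vis p.1 then best
    else
      match best with
      | none => some (p.2, p.1)
      | some b => if pvLt6 (p.2, p.1) b then some (p.2, p.1) else best) none

def pvLoopB (grid : List (List Int)) : Nat → PySem.Dict PvS Int → PySem.Set PvS → Int
  | 0, _, _ => -1   -- never reached: each iteration returns or grows visited (see the proofs)
  | f+1, dist, vis =>
    match pvBestOf dist vis with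
    | none => -1
    | some (d, s) =>
      if s.1 = (grid.length : Int) - 1 ∧ s.2.1 = pvWidth grid - 1 then d
      else pvLoopB grid f (pvRelax grid d s (PySem.Set.add vis s) dist) (PySem.Set.add vis s)

def pvFuelB (grid : List (List Int)) : Nat := 1 + (pvStates grid).length

def find_least_heat_loss_alt (grid : List (List Int)) : Int :=
  pvLoopB grid (pvFuelB grid)
    (PySem.Dict.ofList [((((0:Int),(0:Int),(0:Int),(0:Int),(0:Int)) : PvS), (0:Int))]) []

-- ===== PRECONDITION & SPEC =====
-- Pre_ excludes the empty grid (A happens to return -1 only because `0 <= row < len(grid)`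
-- short-circuits; B evaluates grid[0] first and raises IndexError there) and ragged grids with a
-- row shorter than row 0, on which A raises IndexError whenever a missing cell is reached and
-- otherwise returns a value that depends on that accident of its bounds check.
def Pre_find_least_heat_loss (grid : List (List Int)) : Prop :=
  grid ≠ [] ∧ ∀ row ∈ grid, (grid.headD []).length ≤ row.length
instance (grid : List (List Int)) : Decidable (Pre_find_least_heat_loss grid) := by
  unfold Pre_find_least_heat_loss; infer_instance

def pvWitness_find_least_heat_loss : List (List Int) := [[1, 2], [3, 4]]

def Spec_find_least_heat_loss (grid : List (List Int)) (out : Int) : Prop :=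
  out = find_least_heat_loss_alt grid
instance (grid : List (List Int)) (out : Int) : Decidable (Spec_find_least_heat_loss grid out) := by
  unfold Spec_find_least_heat_loss; infer_instance

-- ===== CLAIM (what is proved, stated in full; the proofs are below) =====
def Claim_equal_find_least_heat_loss : Prop := ∀ (grid : List (List Int)), Dom_find_least_heat_loss grid → Pre_find_least_heat_loss grid → Spec_find_least_heat_loss grid (find_least_heat_loss grid)

-- ===== LEMMAS AND PROOFS =====

-- ---- the strict lexicographic order: basic facts ----
theorem pvLt6_irrefl (a : PvE) : pvLt6 a a = false := by
  obtain ⟨a1, a2, a3, a4, a5, a6⟩ := a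
  simp [pvLt6]

theorem pvLt6_asymm {a b : PvE} (h : pvLt6 a b = true) : pvLt6 b a = false := by
  obtain ⟨a1, a2, a3, a4, a5, a6⟩ := a
  obtain ⟨b1, b2, b3, b4, b5, b6⟩ := b
  simp only [pvLt6, decide_eq_true_eq] at h
  simp only [pvLt6, decide_eq_false_iff_not]
  omega

theorem pvLt6_trans {a b c : PvE} (h1 : pvLt6 a b = true) (h2 : pvLt6 b c = true) :
    pvLt6 a c = true := by
  obtain ⟨a1, a2, a3, a4, a5, a6⟩ := a
  obtain ⟨b1, b2, b3, b4, b5, b6⟩ := b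
  obtain ⟨c1, c2, c3, c4, c5, c6⟩ := c
  simp only [pvLt6, decide_eq_true_eq] at h1 h2 ⊢
  omega

theorem pvLt6_total {a b : PvE} (h : a ≠ b) : pvLt6 a b = true ∨ pvLt6 b a = true := by
  obtain ⟨a1, a2, a3, a4, a5, a6⟩ := a
  obtain ⟨b1, b2, b3, b4, b5, b6⟩ := b
  have h' : ¬(a1 = b1 ∧ a2 = b2 ∧ a3 = b3 ∧ a4 = b4 ∧ a5 = b5 ∧ a6 = b6) := by
    rintro ⟨rfl, rfl, rfl, rfl, rfl, rfl⟩; exact h rfl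
  simp only [pvLt6, decide_eq_true_eq]
  omega

-- ---- pvMinOf: the popped entry is a member and nothing in the queue is below it ----
theorem pvMinOf_eq_none {q : List PvE} : pvMinOf q = none ↔ q = [] := by
  cases q with
  | nil => simp [pvMinOf]
  | cons e q' =>
    simp only [pvMinOf, List.foldl_cons]
    constructor
    · intro h
      exfalso
      have : ∀ (l : List PvE) (m : PvE),
          l.foldl (fun acc e => match acc with
            | none => some e
            | some m => if pvLt6 e m then some e else some m) (some m) ≠ none := by
        intro l
        induction l with
        | nil => simp
        | cons x l ih => intro m; simp only [List.foldl_cons]; split <;> apply ih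
      exact this q' e h
    · intro h; cases h

theorem pvMinOf_aux (q : List PvE) : ∀ (a : PvE), ∃ m,
    q.foldl (fun acc e => match acc with
      | none => some e
      | some m => if pvLt6 e m then some e else some m) (some a) = some m ∧
    (m = a ∨ m ∈ q) ∧ pvLt6 a m = false ∧ ∀ y ∈ q, pvLt6 y m = false := by
  induction q with
  | nil => intro a; exact ⟨a, rfl, Or.inl rfl, pvLt6_irrefl a, by simp⟩
  | cons e q' ih =>
    intro a
    simp only [List.foldl_cons]
    by_cases he : pvLt6 e a = true
    · simp only [he, if_pos]
      obtain ⟨m, hfold, hmem, hle, hall⟩ := ih e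
      refine ⟨m, hfold, ?_, ?_, ?_⟩
      · rcases hmem with h | h
        · exact Or.inr (by simp [h])
        · exact Or.inr (List.mem_cons_of_mem _ h)
      · -- pvLt6 a m = false : from pvLt6 e m = false and pvLt6 e a
        by_cases hc : pvLt6 a m = true
        · have := pvLt6_trans he hc
          simp [this] at hle
        · simpa using hc
      · intro y hy
        rcases List.mem_cons.mp hy with rfl | hy'
        · exact hle
        · exact hall y hy'
    · have he' : pvLt6 e a = false := by simpa using he
      simp only [he', Bool.false_eq_true]
      obtain ⟨m, hfold, hmem, hle, hall⟩ := ih a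
      refine ⟨m, by simpa using hfold, ?_, hle, ?_⟩
      · rcases hmem with h | h
        · exact Or.inl h
        · exact Or.inr (List.mem_cons_of_mem _ h)
      · intro y hy
        rcases List.mem_cons.mp hy with rfl | hy'
        · -- pvLt6 y m = false : from pvLt6 y a = false, pvLt6 a m = false
          by_cases hc : pvLt6 y m = true
          · rcases eq_or_ne y a with rfl | hna
            · simp [hc] at hle
            · rcases pvLt6_total hna with h1 | h1
              · simp [h1] at he'
              · have := pvLt6_trans h1 hc
                simp [this] at hle
          · simpa using hc
        · exact hall y hy'

theorem pvMinOf_spec {q : List PvE} {m : PvE} (h : pvMinOf q = some m) :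
    m ∈ q ∧ ∀ y ∈ q, pvLt6 y m = false := by
  cases q with
  | nil => cases h
  | cons e q' =>
    simp only [pvMinOf, List.foldl_cons] at h
    obtain ⟨m', hfold, hmem, hle, hall⟩ := pvMinOf_aux q' e
    rw [hfold] at h
    obtain rfl : m' = m := by injection h
    refine ⟨?_, ?_⟩
    · rcases hmem with rfl | h'
      · exact List.mem_cons_self
      · exact List.mem_cons_of_mem _ h'
    · intro y hy
      rcases List.mem_cons.mp hy with rfl | hy'
      · exact hle
      · exact hall y hy'

-- ---- pvSMin: the least heat with which a given state occurs in A's queue ----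
def pvSStep (t : PvS) (acc : Option Int) (e : PvE) : Option Int :=
  if e.2 = t then some (match acc with | none => e.1 | some v => min v e.1) else acc

def pvSMin (q : List PvE) (t : PvS) : Option Int := q.foldl (pvSStep t) none

theorem pvSStep_comm (t : PvS) (acc : Option Int) (e1 e2 : PvE) :
    pvSStep t (pvSStep t acc e1) e2 = pvSStep t (pvSStep t acc e2) e1 := by
  unfold pvSStep
  by_cases h1 : e1.2 = t <;> by_cases h2 : e2.2 = t <;> simp [h1, h2]
  cases acc with
  | none => simp [min_comm]
  | some v => simp; omega

theorem pvSfold_erase {m : PvE} {t : PvS} (hne : m.2 ≠ t) :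
    ∀ (q : List PvE) (acc : Option Int),
      (q.erase m).foldl (pvSStep t) acc = q.foldl (pvSStep t) acc := by
  intro q
  induction q with
  | nil => intro acc; simp
  | cons x q' ih =>
    intro acc
    rw [List.erase_cons]
    by_cases hx : x = m
    · subst hx
      simp only [BEq.rfl, if_pos]
      have : pvSStep t acc x = acc := by simp [pvSStep, hne]
      simp only [List.foldl_cons, this]
    · have : (x == m) = false := by simp [hx]
      simp only [this, Bool.false_eq_true, List.foldl_cons]
      exact ih _

theorem pvSfold_mono {t : PvS} :
    ∀ (q : List PvE) (v : Int) {d : Int},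
      q.foldl (pvSStep t) (some v) = some d → d ≤ v := by
  intro q
  induction q with
  | nil => intro v d h; injection h with h; omega
  | cons e q' ih =>
    intro v d h
    simp only [List.foldl_cons] at h
    by_cases he : e.2 = t
    · rw [show pvSStep t (some v) e = some (min v e.1) by simp [pvSStep, he]] at h
      have := ih _ h
      omega
    · rw [show pvSStep t (some v) e = some v by simp [pvSStep, he]] at h
      exact ih _ h

theorem pvSfold_le {t : PvS} :
    ∀ (q : List PvE) (acc : Option Int) {d : Int},
      q.foldl (pvSStep t) acc = some d → ∀ h', (h', t) ∈ q → d ≤ h' := by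
  intro q
  induction q with
  | nil => intro acc d _ h' hmem; cases hmem
  | cons e q' ih =>
    intro acc d h h' hmem
    simp only [List.foldl_cons] at h
    rcases List.mem_cons.mp hmem with heq | hmem'
    · -- e = (h', t)
      have he2 : e.2 = t := by rw [← heq]
      have he1 : e.1 = h' := by rw [← heq]
      have hstep : ∃ w, pvSStep t acc e = some w ∧ w ≤ h' := by
        cases acc with
        | none => exact ⟨e.1, by simp [pvSStep, he2], by omega⟩
        | some v => exact ⟨min v e.1, by simp [pvSStep, he2], by omega⟩
      obtain ⟨w, hw, hwle⟩ := hstep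
      rw [hw] at h
      have := pvSfold_mono q' w h
      omega
    · exact ih _ h h' hmem'

theorem pvSfold_mem {t : PvS} :
    ∀ (q : List PvE) (acc : Option Int) {d : Int},
      q.foldl (pvSStep t) acc = some d → acc = some d ∨ (d, t) ∈ q := by
  intro q
  induction q with
  | nil => intro acc d h; exact Or.inl h
  | cons e q' ih =>
    intro acc d h
    simp only [List.foldl_cons] at h
    rcases ih _ h with hacc | hmem
    · by_cases he : e.2 = t
      · cases acc with
        | none =>
          rw [show pvSStep t none e = some e.1 by simp [pvSStep, he]] at hacc
          injection hacc with hd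
          right
          have : e = (d, t) := by
            obtain ⟨e1, e2⟩ := e; simp_all
          simp [← this]
        | some v =>
          rw [show pvSStep t (some v) e = some (min v e.1) by simp [pvSStep, he]] at hacc
          injection hacc with hd
          rcases min_choice v e.1 with hmin | hmin
          · left; rw [← hd, hmin]
          · right
            have : e = (d, t) := by
              obtain ⟨e1, e2⟩ := e
              simp only [Prod.mk.injEq]
              constructor
              · simp only at hmin; omega
              · exact he
            simp [← this]
      · rw [show pvSStep t acc e = acc by simp [pvSStep, he]] at hacc
        exact Or.inl hacc
    · exact Or.inr (List.mem_cons_of_mem _ hmem)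

theorem pvSfold_stays_some {t : PvS} :
    ∀ (q : List PvE) (w : Int), ∃ d, q.foldl (pvSStep t) (some w) = some d := by
  intro q
  induction q with
  | nil => exact fun w => ⟨w, rfl⟩
  | cons x q'' ih2 =>
    intro w
    simp only [List.foldl_cons]
    by_cases hx : x.2 = t
    · rw [show pvSStep t (some w) x = some (min w x.1) by simp [pvSStep, hx]]
      exact ih2 _
    · rw [show pvSStep t (some w) x = some w by simp [pvSStep, hx]]
      exact ih2 w

theorem pvSfold_some_of_mem {t : PvS} {h : Int} :
    ∀ (q : List PvE) (acc : Option Int), (h, t) ∈ q → ∃ d, q.foldl (pvSStep t) acc = some d := by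
  intro q
  induction q with
  | nil => intro acc hmem; cases hmem
  | cons e q' ih =>
    intro acc hmem
    simp only [List.foldl_cons]
    rcases List.mem_cons.mp hmem with heq | hmem'
    · -- after this step the accumulator is some _, and it stays some
      have he2 : e.2 = t := by rw [← heq]
      have hs : ∃ w, pvSStep t acc e = some w := by
        cases acc with
        | none => exact ⟨e.1, by simp [pvSStep, he2]⟩
        | some v => exact ⟨min v e.1, by simp [pvSStep, he2]⟩
      obtain ⟨w, hw⟩ := hs
      rw [hw]
      exact pvSfold_stays_some q' w
    · exact ih _ hmem'

theorem pvSMin_eq_some {q : List PvE} {t : PvS} {h : Int}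
    (hmem : (h, t) ∈ q) (hmin : ∀ h', (h', t) ∈ q → h ≤ h') :
    pvSMin q t = some h := by
  obtain ⟨d, hd⟩ := pvSfold_some_of_mem q none hmem
  have h1 : d ≤ h := pvSfold_le q none hd h hmem
  have h2 : (d, t) ∈ q := by
    rcases pvSfold_mem q none hd with hc | hm
    · cases hc
    · exact hm
  have h3 : h ≤ d := hmin d h2
  rw [pvSMin, hd]
  congr 1
  omega

theorem pvSMin_mem {q : List PvE} {t : PvS} {d : Int} (h : pvSMin q t = some d) : (d, t) ∈ q := by
  rcases pvSfold_mem q none h with hc | hm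
  · cases hc
  · exact hm

-- ---- B's dict update: effect on get? ----
theorem pvBUpd_get? (vis : PySem.Set PvS) (t0 : PvS) (nd : Int) (dist : PySem.Dict PvS Int)
    (t : PvS) :
    (pvBUpd vis t0 nd dist).get? t =
      if t0 = t ∧ t0 ∉ vis then
        some (match dist.get? t with | none => nd | some v => min v nd)
      else dist.get? t := by
  unfold pvBUpd
  by_cases hv : t0 ∈ vis
  · rw [if_pos (by simpa [PySem.Set.contains_iff] using hv)]
    rw [if_neg (by tauto)]
  · rw [if_neg (by simpa [PySem.Set.contains_iff] using hv)]
    by_cases hc : ¬ dist.contains t0 = true ∨ nd < dist.getD t0 0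
    · rw [if_pos hc, PySem.Dict.get?_insert]
      by_cases ht : t = t0
      · subst ht
        rw [if_pos rfl, if_pos ⟨rfl, hv⟩]
        rcases hg : dist.get? t with _ | v
        · rfl
        · have hcont : dist.contains t = true := by
            rw [PySem.Dict.contains_eq_isSome_get?, hg]; rfl
          have hgd : dist.getD t 0 = v := by rw [PySem.Dict.getD_eq_get?_getD, hg]; rfl
          rcases hc with hc | hc
          · exact absurd hcont hc
          · rw [hgd] at hc
            simp only [Option.some.injEq, min_def]
            split_ifs <;> omega
      · rw [if_neg ht, if_neg (by tauto)]
    · rw [if_neg hc]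
      rw [not_or, not_not, not_lt] at hc
      obtain ⟨hcont, hge⟩ := hc
      by_cases ht : t0 = t
      · subst ht
        rw [if_pos ⟨rfl, hv⟩]
        rcases hg : dist.get? t0 with _ | v
        · rw [PySem.Dict.contains_eq_isSome_get?, hg] at hcont; cases hcont
        · have hgd : dist.getD t0 0 = v := by rw [PySem.Dict.getD_eq_get?_getD, hg]; rfl
          rw [hgd] at hge
          simp only [Option.some.injEq, min_def]
          split_ifs <;> omega
      · rw [if_neg (by tauto)]

theorem pvBUpd_nodup {vis : PySem.Set PvS} {t0 : PvS} {nd : Int} {dist : PySem.Dict PvS Int}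
    (h : dist.keys.Nodup) : (pvBUpd vis t0 nd dist).keys.Nodup := by
  unfold pvBUpd
  split_ifs <;> first | exact h | exact PySem.Dict.nodup_keys_insert dist t0 nd h

-- the loop body of pvRelax, named for the proofs (pvRelax_eq : rfl)
def pvBStep (grid : List (List Int)) (d : Int) (s : PvS) (vis : PySem.Set PvS)
    (dist : PySem.Dict PvS Int) (dd : Int × Int) : PySem.Dict PvS Int :=
  if dd.1 = -s.2.2.1 ∧ dd.2 = -s.2.2.2.1 then dist
  else
    match (if dd.1 = s.2.2.1 ∧ dd.2 = s.2.2.2.1 then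
             (if s.2.2.2.2 ≥ 3 then none else some (s.2.2.2.2 + 1))
           else some 1 : Option Int) with
    | none => dist
    | some nn =>
      if 0 ≤ s.1 + dd.1 ∧ s.1 + dd.1 < (grid.length : Int) ∧
         0 ≤ s.2.1 + dd.2 ∧ s.2.1 + dd.2 < pvWidth grid then
        pvBUpd vis (s.1 + dd.1, s.2.1 + dd.2, dd.1, dd.2, nn)
          (d + pvCell grid (s.1 + dd.1) (s.2.1 + dd.2)) dist
      else dist

theorem pvRelax_eq (grid : List (List Int)) (d : Int) (s : PvS) (vis : PySem.Set PvS)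
    (dist : PySem.Dict PvS Int) :
    pvRelax grid d s vis dist = pvDirs.foldl (pvBStep grid d s vis) dist := rfl

-- the entries A's expansion of (h, s) contributes for one direction (pvPushesA is a permutation
-- of pvDirs.flatMap of this, and pvBStep performs exactly this entry's relaxation)
def pvCand (grid : List (List Int)) (h : Int) (s : PvS) (dd : Int × Int) : List PvE :=
  if dd.1 = -s.2.2.1 ∧ dd.2 = -s.2.2.2.1 then []
  else
    match (if dd.1 = s.2.2.1 ∧ dd.2 = s.2.2.2.1 then
             (if s.2.2.2.2 ≥ 3 then none else some (s.2.2.2.2 + 1))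
           else some 1 : Option Int) with
    | none => []
    | some nn =>
      if 0 ≤ s.1 + dd.1 ∧ s.1 + dd.1 < (grid.length : Int) ∧
         0 ≤ s.2.1 + dd.2 ∧ s.2.1 + dd.2 < pvWidth grid then
        [(h + pvCell grid (s.1 + dd.1) (s.2.1 + dd.2),
          s.1 + dd.1, s.2.1 + dd.2, dd.1, dd.2, nn)]
      else []

theorem pvBStep_get? (grid : List (List Int)) (d : Int) (s : PvS) (vis : PySem.Set PvS)
    (dist : PySem.Dict PvS Int) (dd : Int × Int) {t : PvS} (ht : t ∉ vis) :
    (pvBStep grid d s vis dist dd).get? t =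
      (pvCand grid d s dd).foldl (pvSStep t) (dist.get? t) := by
  have key : ∀ (t0 : PvS) (nd : Int),
      (pvBUpd vis t0 nd dist).get? t = pvSStep t (dist.get? t) (nd, t0) := by
    intro t0 nd
    rw [pvBUpd_get?]
    simp only [pvSStep]
    by_cases he : t0 = t
    · rw [if_pos ⟨he, he ▸ ht⟩, if_pos he]
    · rw [if_neg (by tauto), if_neg he]
  unfold pvBStep pvCand
  split_ifs <;> simp only [List.foldl_cons, List.foldl_nil, key]

theorem pvBStep_nodup {grid : List (List Int)} {d : Int} {s : PvS} {vis : PySem.Set PvS}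
    {dist : PySem.Dict PvS Int} {dd : Int × Int} (h : dist.keys.Nodup) :
    (pvBStep grid d s vis dist dd).keys.Nodup := by
  unfold pvBStep
  split_ifs <;> first | exact h | exact pvBUpd_nodup h

theorem pvRelaxFold_get? (grid : List (List Int)) (d : Int) (s : PvS) (vis : PySem.Set PvS)
    {t : PvS} (ht : t ∉ vis) :
    ∀ (ds : List (Int × Int)) (dist : PySem.Dict PvS Int),
      (ds.foldl (pvBStep grid d s vis) dist).get? t =
        (ds.flatMap (pvCand grid d s)).foldl (pvSStep t) (dist.get? t) := by
  intro ds
  induction ds with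
  | nil => intro dist; rfl
  | cons dd ds ih =>
    intro dist
    simp only [List.foldl_cons, List.flatMap_cons, List.foldl_append]
    rw [ih, pvBStep_get? grid d s vis dist dd ht]

theorem pvRelaxFold_nodup {grid : List (List Int)} {d : Int} {s : PvS} {vis : PySem.Set PvS} :
    ∀ (ds : List (Int × Int)) (dist : PySem.Dict PvS Int), dist.keys.Nodup →
      (ds.foldl (pvBStep grid d s vis) dist).keys.Nodup := by
  intro ds
  induction ds with
  | nil => exact fun dist h => h
  | cons dd ds ih => exact fun dist h => ih _ (pvBStep_nodup h)

-- ---- pvBestOf: B's selection scan returns the strictly least unvisited (heat, state) ----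
theorem pvBestOf_fold_skip (vis : PySem.Set PvS) :
    ∀ (l : List (PvS × Int)) (acc : Option PvE), (∀ p ∈ l, p.1 ∈ vis) →
      l.foldl (fun best p =>
        if PySem.Set.contains vis p.1 then best
        else match best with
          | none => some (p.2, p.1)
          | some b => if pvLt6 (p.2, p.1) b then some (p.2, p.1) else best) acc = acc := by
  intro l
  induction l with
  | nil => intro acc _; rfl
  | cons p l ih =>
    intro acc h
    simp only [List.foldl_cons]
    rw [if_pos (by simpa [PySem.Set.contains_iff] using h p List.mem_cons_self)]
    exact ih acc fun q hq => h q (List.mem_cons_of_mem _ hq)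

theorem pvBestOf_none {dist : PySem.Dict PvS Int} {vis : PySem.Set PvS}
    (h : ∀ p ∈ dist.items, p.1 ∈ vis) : pvBestOf dist vis = none :=
  pvBestOf_fold_skip vis dist.items none h

theorem pvBestOf_fold_keep (vis : PySem.Set PvS) (e : PvE) :
    ∀ (l : List (PvS × Int)), (∀ p ∈ l, p.1 ∉ vis → pvLt6 (p.2, p.1) e = false) →
      l.foldl (fun best p =>
        if PySem.Set.contains vis p.1 then best
        else match best with
          | none => some (p.2, p.1)
          | some b => if pvLt6 (p.2, p.1) b then some (p.2, p.1) else best) (some e) = some e := by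
  intro l
  induction l with
  | nil => intro _; rfl
  | cons p l ih =>
    intro h
    simp only [List.foldl_cons]
    by_cases hv : p.1 ∈ vis
    · rw [if_pos (by simpa [PySem.Set.contains_iff] using hv)]
      exact ih fun q hq => h q (List.mem_cons_of_mem _ hq)
    · rw [if_neg (by simpa [PySem.Set.contains_iff] using hv)]
      have := h p List.mem_cons_self hv
      simp only [this, Bool.false_eq_true]
      exact ih fun q hq => h q (List.mem_cons_of_mem _ hq)

theorem pvBestOf_fold_main (vis : PySem.Set PvS) (e : PvE) :
    ∀ (l : List (PvS × Int)) (acc : Option PvE),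
      (e.2, e.1) ∈ l →
      e.2 ∉ vis →
      (∀ p ∈ l, p.1 = e.2 → p = (e.2, e.1)) →
      (∀ p ∈ l, p.1 ∉ vis → p.1 ≠ e.2 → pvLt6 e (p.2, p.1) = true) →
      (acc = none ∨ ∃ b, acc = some b ∧ pvLt6 e b = true) →
      l.foldl (fun best p =>
        if PySem.Set.contains vis p.1 then best
        else match best with
          | none => some (p.2, p.1)
          | some b => if pvLt6 (p.2, p.1) b then some (p.2, p.1) else best) acc = some e := by
  intro l
  induction l with
  | nil => intro acc hmem; cases hmem
  | cons p l ih =>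
    intro acc hmem hnv hkey hlt hacc
    simp only [List.foldl_cons]
    by_cases hp : p = (e.2, e.1)
    · -- the element that carries e
      subst hp
      rw [if_neg (by simpa [PySem.Set.contains_iff] using hnv)]
      have hrest : ∀ q ∈ l, q.1 ∉ vis → pvLt6 (q.2, q.1) e = false := by
        intro q hq hqv
        by_cases hqe : q.1 = e.2
        · have : q = (e.2, e.1) := hkey q (List.mem_cons_of_mem _ hq) hqe
          rw [this]
          exact pvLt6_irrefl e
        · exact pvLt6_asymm (hlt q (List.mem_cons_of_mem _ hq) hqv hqe)
      rcases hacc with rfl | ⟨b, rfl, hb⟩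
      · exact pvBestOf_fold_keep vis e l hrest
      · dsimp only
        rw [if_pos (show pvLt6 ((e.2, e.1).2, (e.2, e.1).1) b = true from hb)]
        exact pvBestOf_fold_keep vis e l hrest
    · -- some other element
      have hmem' : (e.2, e.1) ∈ l := by
        rcases List.mem_cons.mp hmem with h | h
        · exact absurd h.symm hp
        · exact h
      have hp1 : p.1 ≠ e.2 := fun hq => hp (hkey p List.mem_cons_self hq)
      by_cases hv : p.1 ∈ vis
      · rw [if_pos (by simpa [PySem.Set.contains_iff] using hv)]
        exact ih acc hmem' hnv (fun q hq => hkey q (List.mem_cons_of_mem _ hq))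
          (fun q hq => hlt q (List.mem_cons_of_mem _ hq)) hacc
      · rw [if_neg (by simpa [PySem.Set.contains_iff] using hv)]
        have hel : pvLt6 e (p.2, p.1) = true := hlt p List.mem_cons_self hv hp1
        have hacc' : (match acc with
            | none => some (p.2, p.1)
            | some b => if pvLt6 (p.2, p.1) b then some (p.2, p.1) else acc) = none ∨
            ∃ b, (match acc with
            | none => some (p.2, p.1)
            | some b => if pvLt6 (p.2, p.1) b then some (p.2, p.1) else acc) = some b ∧
              pvLt6 e b = true := by
          rcases hacc with rfl | ⟨b, rfl, hb⟩
          · exact Or.inr ⟨(p.2, p.1), rfl, hel⟩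
          · by_cases hc : pvLt6 (p.2, p.1) b = true
            · simp only [hc, if_pos]
              exact Or.inr ⟨(p.2, p.1), rfl, hel⟩
            · simp only [Bool.not_eq_true] at hc
              simp only [hc, Bool.false_eq_true]
              exact Or.inr ⟨b, rfl, hb⟩
        exact ih _ hmem' hnv (fun q hq => hkey q (List.mem_cons_of_mem _ hq))
          (fun q hq => hlt q (List.mem_cons_of_mem _ hq)) hacc'

-- ---- the finite state space ----
theorem mem_pvStates {grid : List (List Int)} {x : PvS} :
    x ∈ pvStates grid ↔ x = ((0:Int),(0:Int),(0:Int),(0:Int),(0:Int)) ∨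
      (0 ≤ x.1 ∧ x.1 < (grid.length : Int) ∧ 0 ≤ x.2.1 ∧ x.2.1 < pvWidth grid ∧
       (x.2.2.1, x.2.2.2.1) ∈ pvDirs ∧ 1 ≤ x.2.2.2.2 ∧ x.2.2.2.2 ≤ 3) := by
  obtain ⟨r, c, d1, d2, n⟩ := x
  simp only [pvStates, List.mem_cons, List.mem_flatMap, List.mem_map,
    PySem.List.mem_pyRange_one]
  constructor
  · rintro (h | ⟨r', hr', c', hc', dd, hdd, n', hn', heq⟩)
    · exact Or.inl h
    · right
      obtain ⟨hh1, hh2, hh3, hh4, hh5⟩ : r' = r ∧ c' = c ∧ dd.1 = d1 ∧ dd.2 = d2 ∧ n' = n := by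
        simpa [Prod.ext_iff] using heq
      subst hh1; subst hh2; subst hh5
      refine ⟨hr'.1, hr'.2, hc'.1, hc'.2, ?_, by omega, by omega⟩
      rw [← hh3, ← hh4]
      simpa using hdd
  · rintro (h | ⟨h1, h2, h3, h4, h5, h6, h7⟩)
    · exact Or.inl h
    · right
      exact ⟨r, ⟨h1, h2⟩, c, ⟨h3, h4⟩, (d1, d2), h5, n, ⟨by omega, by omega⟩, rfl⟩

theorem start_not_mem_pvDirs : (((0:Int)), ((0:Int))) ∉ pvDirs := by decide

theorem pvCand_state_valid {grid : List (List Int)} {h : Int} {s : PvS} {dd : Int × Int}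
    (hgs : s ∈ pvStates grid) (hdd : dd ∈ pvDirs) {e : PvE}
    (he : e ∈ pvCand grid h s dd) : e.2 ∈ pvStates grid := by
  have hn13 : dd.1 = s.2.2.1 ∧ dd.2 = s.2.2.2.1 → 1 ≤ s.2.2.2.2 ∧ s.2.2.2.2 ≤ 3 := by
    intro hsame
    rcases mem_pvStates.mp hgs with hst | hst
    · exfalso
      apply start_not_mem_pvDirs
      have e1 : s.2.2.1 = 0 := by rw [hst]
      have e2 : s.2.2.2.1 = 0 := by rw [hst]
      rw [← hsame.1] at e1
      rw [← hsame.2] at e2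
      have : dd = ((0:Int), (0:Int)) := Prod.ext e1 e2
      rwa [this] at hdd
    · exact ⟨hst.2.2.2.2.2.1, hst.2.2.2.2.2.2⟩
  unfold pvCand at he
  by_cases h1 : dd.1 = -s.2.2.1 ∧ dd.2 = -s.2.2.2.1
  · rw [if_pos h1] at he; cases he
  · rw [if_neg h1] at he
    by_cases hsame : dd.1 = s.2.2.1 ∧ dd.2 = s.2.2.2.1
    · rw [if_pos hsame] at he
      by_cases h3 : s.2.2.2.2 ≥ 3
      · rw [if_pos h3] at he; cases he
      · rw [if_neg h3] at he
        dsimp only at he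
        split_ifs at he with h2
        · rcases List.mem_singleton.mp he with rfl
          rw [mem_pvStates]
          right
          have hnb := hn13 hsame
          dsimp only
          refine ⟨h2.1, h2.2.1, h2.2.2.1, h2.2.2.2, by simpa using hdd, ?_, ?_⟩ <;> omega
        · cases he
    · rw [if_neg hsame] at he
      dsimp only at he
      split_ifs at he with h2
      · rcases List.mem_singleton.mp he with rfl
        rw [mem_pvStates]
        right
        dsimp only
        refine ⟨h2.1, h2.2.1, h2.2.2.1, h2.2.2.2, by simpa using hdd, ?_, ?_⟩ <;> omega
      · cases he

theorem pvCand_length {grid : List (List Int)} {h : Int} {s : PvS} {dd : Int × Int} :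
    (pvCand grid h s dd).length ≤ 1 := by
  unfold pvCand
  by_cases h1 : dd.1 = -s.2.2.1 ∧ dd.2 = -s.2.2.2.1
  · rw [if_pos h1]; simp
  · rw [if_neg h1]
    by_cases hsame : dd.1 = s.2.2.1 ∧ dd.2 = s.2.2.2.1
    · rw [if_pos hsame]
      by_cases h3 : s.2.2.2.2 ≥ 3
      · rw [if_pos h3]; simp
      · rw [if_neg h3]
        dsimp only
        split_ifs <;> simp
    · rw [if_neg hsame]
      dsimp only
      split_ifs <;> simp

-- ---- A's pushes are, up to order, the concatenation of the per-direction candidates ----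
theorem pv_valid_iff {grid : List (List Int)} {r c : Int} :
    (is_valid_position r c grid = true) ↔
      (0 ≤ r ∧ r < (grid.length : Int) ∧ 0 ≤ c ∧ c < pvWidth grid) := by
  simp [is_valid_position, and_assoc]

-- the contribution of one direction of A's explicit loop
def pvLoopCand (grid : List (List Int)) (h : Int) (s : PvS) (d : Int × Int) : List PvE :=
  if (d.1 = s.2.2.1 ∧ d.2 = s.2.2.2.1) ∨ (d.1 = -s.2.2.1 ∧ d.2 = -s.2.2.2.1) then []
  else if is_valid_position (s.1 + d.1) (s.2.1 + d.2) grid then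
    [(h + pvCell grid (s.1 + d.1) (s.2.1 + d.2), s.1 + d.1, s.2.1 + d.2, d.1, d.2, 1)]
  else []

-- A's same-direction block
def pvB1 (grid : List (List Int)) (h : Int) (s : PvS) : List PvE :=
  if s.2.2.2.2 < 3 ∧ ¬(s.2.2.1 = 0 ∧ s.2.2.2.1 = 0) then
    (if is_valid_position (s.1 + s.2.2.1) (s.2.1 + s.2.2.2.1) grid then
       [(h + pvCell grid (s.1 + s.2.2.1) (s.2.1 + s.2.2.2.1),
         s.1 + s.2.2.1, s.2.1 + s.2.2.2.1, s.2.2.1, s.2.2.2.1, s.2.2.2.2 + 1)]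
     else [])
  else []

theorem pvFoldA_eq (grid : List (List Int)) (h : Int) (s : PvS) :
    ∀ (ds : List (Int × Int)) (acc : List PvE),
      ds.foldl (fun acc d =>
        if (d.1 = s.2.2.1 ∧ d.2 = s.2.2.2.1) ∨ (d.1 = -s.2.2.1 ∧ d.2 = -s.2.2.2.1) then acc
        else if is_valid_position (s.1 + d.1) (s.2.1 + d.2) grid then
          acc ++ [(h + pvCell grid (s.1 + d.1) (s.2.1 + d.2), s.1 + d.1, s.2.1 + d.2, d.1, d.2, 1)]
        else acc) acc = acc ++ ds.flatMap (pvLoopCand grid h s) := by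
  intro ds
  induction ds with
  | nil => intro acc; simp
  | cons d ds ih =>
    intro acc
    simp only [List.foldl_cons, List.flatMap_cons]
    rw [ih]
    unfold pvLoopCand
    split_ifs <;> simp

theorem pvPushesA_eq (grid : List (List Int)) (h : Int) (s : PvS) :
    pvPushesA grid h s = pvB1 grid h s ++ pvDirs.flatMap (pvLoopCand grid h s) := by
  unfold pvPushesA pvB1
  rw [pvFoldA_eq grid h s pvDirs []]
  simp

theorem pvCand_same_eq_B1 (grid : List (List Int)) (h : Int) (s : PvS) :
    pvCand grid h s (s.2.2.1, s.2.2.2.1) = pvB1 grid h s := by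
  obtain ⟨r, c, dr, dc, n⟩ := s
  unfold pvCand pvB1
  dsimp only
  by_cases hz : dr = 0 ∧ dc = 0
  · rw [if_pos ⟨by omega, by omega⟩, if_neg (fun hcon => hcon.2 hz)]
  · rw [if_neg (fun hcon => hz ⟨by omega, by omega⟩), if_pos ⟨rfl, rfl⟩]
    by_cases h3 : n ≥ 3
    · rw [if_pos h3, if_neg (fun hcon => by omega)]
    · rw [if_neg h3, if_pos ⟨by omega, fun hcon => hz hcon⟩]
      dsimp only
      by_cases hv : is_valid_position (r + dr) (c + dc) grid = true
      · rw [if_pos (pv_valid_iff.mp hv), if_pos hv]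
      · rw [if_neg (fun hc => hv (pv_valid_iff.mpr hc)), if_neg hv]

theorem pvCand_eq_loopCand (grid : List (List Int)) (h : Int) (s : PvS) (d : Int × Int)
    (hne : ¬(d.1 = s.2.2.1 ∧ d.2 = s.2.2.2.1)) :
    pvCand grid h s d = pvLoopCand grid h s d := by
  obtain ⟨r, c, dr, dc, n⟩ := s
  unfold pvCand pvLoopCand
  dsimp only at hne ⊢
  by_cases hrev : d.1 = -dr ∧ d.2 = -dc
  · rw [if_pos hrev, if_pos (Or.inr hrev)]
  · rw [if_neg hrev, if_neg (fun hc => Or.elim hc hne hrev), if_neg hne]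
    dsimp only
    by_cases hv : is_valid_position (r + d.1) (c + d.2) grid = true
    · rw [if_pos (pv_valid_iff.mp hv), if_pos hv]
    · rw [if_neg (fun hc => hv (pv_valid_iff.mpr hc)), if_neg hv]

theorem pvFlatMap_eq_of_not_mem (grid : List (List Int)) (h : Int) (s : PvS) :
    ∀ (ds : List (Int × Int)), (s.2.2.1, s.2.2.2.1) ∉ ds →
      ds.flatMap (pvCand grid h s) = ds.flatMap (pvLoopCand grid h s) := by
  intro ds
  induction ds with
  | nil => intro _; rfl
  | cons d ds ih =>
    intro hnm
    simp only [List.mem_cons, not_or] at hnm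
    simp only [List.flatMap_cons]
    rw [ih hnm.2, pvCand_eq_loopCand grid h s d (by
      intro ⟨ha, hb⟩
      exact hnm.1 (by rw [← ha, ← hb]))]

theorem pv_perm_mid {α : Type} (a b c : List α) : (a ++ (b ++ c)).Perm (b ++ (a ++ c)) := by
  have h1 : a ++ (b ++ c) = (a ++ b) ++ c := by rw [List.append_assoc]
  have h2 : b ++ (a ++ c) = (b ++ a) ++ c := by rw [List.append_assoc]
  rw [h1, h2]
  exact List.Perm.append_right c List.perm_append_comm

theorem pvFlatMap_cand_perm (grid : List (List Int)) (h : Int) (s : PvS) :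
    ∀ (ds : List (Int × Int)), ds.Nodup →
      (ds.flatMap (pvCand grid h s)).Perm
        ((if (s.2.2.1, s.2.2.2.1) ∈ ds then pvB1 grid h s else []) ++
          ds.flatMap (pvLoopCand grid h s)) := by
  intro ds
  induction ds with
  | nil => intro _; simp
  | cons d ds ih =>
    intro hnd
    have hd_notin : d ∉ ds := (List.nodup_cons.mp hnd).1
    have hds : ds.Nodup := (List.nodup_cons.mp hnd).2
    by_cases hd : d = (s.2.2.1, s.2.2.2.1)
    · subst hd
      rw [if_pos List.mem_cons_self]
      simp only [List.flatMap_cons]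
      rw [pvCand_same_eq_B1, pvFlatMap_eq_of_not_mem grid h s ds hd_notin]
      have hlc : pvLoopCand grid h s (s.2.2.1, s.2.2.2.1) = [] := by
        unfold pvLoopCand
        rw [if_pos (Or.inl ⟨rfl, rfl⟩)]
      rw [hlc, List.nil_append]
    · have hmm : ((s.2.2.1, s.2.2.2.1) ∈ d :: ds) ↔ ((s.2.2.1, s.2.2.2.1) ∈ ds) := by
        simp only [List.mem_cons]
        constructor
        · rintro (hx | hx)
          · exact absurd hx.symm hd
          · exact hx
        · exact Or.inr
      simp only [List.flatMap_cons]
      rw [pvCand_eq_loopCand grid h s d (by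
        intro ⟨ha, hb⟩
        exact hd (Prod.ext ha hb))]
      by_cases hmem : (s.2.2.1, s.2.2.2.1) ∈ ds
      · rw [if_pos (hmm.mpr hmem)]
        have h0 := ih hds
        rw [if_pos hmem] at h0
        exact (List.Perm.append_left (pvLoopCand grid h s d) h0).trans (pv_perm_mid _ _ _)
      · rw [if_neg (fun hc => hmem (hmm.mp hc))]
        have := ih hds
        rw [if_neg hmem, List.nil_append] at this
        exact List.Perm.append_left _ this

theorem pvPushes_perm {grid : List (List Int)} {h : Int} {s : PvS}
    (hgs : s ∈ pvStates grid) :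
    (pvPushesA grid h s).Perm (pvDirs.flatMap (pvCand grid h s)) := by
  rw [pvPushesA_eq]
  have hnd : pvDirs.Nodup := by decide
  have hp := pvFlatMap_cand_perm grid h s pvDirs hnd
  by_cases hmem : (s.2.2.1, s.2.2.2.1) ∈ pvDirs
  · rw [if_pos hmem] at hp
    exact hp.symm
  · rw [if_neg hmem, List.nil_append] at hp
    have hB1 : pvB1 grid h s = [] := by
      unfold pvB1
      rcases mem_pvStates.mp hgs with hst | hst
      · rw [if_neg (by
          intro ⟨_, hcon⟩
          apply hcon
          constructor
          · have := congrArg (fun x : PvS => x.2.2.1) hst; simpa using this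
          · have := congrArg (fun x : PvS => x.2.2.2.1) hst; simpa using this)]
      · exact absurd hst.2.2.2.2.1 hmem
    rw [hB1, List.nil_append]
    exact hp.symm

theorem pv_nodup_subset_len {l1 l2 : List PvS} (h1 : l1.Nodup) (h2 : l1 ⊆ l2) :
    l1.length ≤ l2.length := (List.Nodup.subperm h1 h2).length_le

theorem pvSfold_perm {t : PvS} {l1 l2 : List PvE} (hp : l1.Perm l2) (acc : Option Int) :
    l1.foldl (pvSStep t) acc = l2.foldl (pvSStep t) acc :=
  @List.Perm.foldl_eq _ _ (pvSStep t) l1 l2 ⟨fun a x y => pvSStep_comm t a x y⟩ hp acc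

theorem pvPushes_len {grid : List (List Int)} {h : Int} {s : PvS}
    (hgs : s ∈ pvStates grid) : (pvPushesA grid h s).length ≤ 4 := by
  rw [(pvPushes_perm hgs).length_eq]
  simp only [pvDirs, List.flatMap_cons, List.flatMap_nil, List.length_append,
    List.length_nil]
  have h1 := @pvCand_length grid h s ((-1, 0))
  have h2 := @pvCand_length grid h s ((1, 0))
  have h3 := @pvCand_length grid h s ((0, -1))
  have h4 := @pvCand_length grid h s ((0, 1))
  omega

theorem pvLt6_same_state {h1 h2 : Int} {s : PvS} :
    pvLt6 (h1, s) (h2, s) = true ↔ h1 < h2 := by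
  obtain ⟨a, b, c, d, e⟩ := s
  simp only [pvLt6, decide_eq_true_eq]
  omega

theorem pvBestOf_eq {dist : PySem.Dict PvS Int} {seen : PySem.Set PvS}
    (hdk : dist.keys.Nodup) {e : PvE}
    (hget : dist.get? e.2 = some e.1) (hnv : e.2 ∉ seen)
    (hlt : ∀ p ∈ dist.items, p.1 ∉ seen → p.1 ≠ e.2 → pvLt6 e (p.2, p.1) = true) :
    pvBestOf dist seen = some e := by
  unfold pvBestOf
  apply pvBestOf_fold_main seen e dist.items none
  · exact (PySem.Dict.get?_eq_some_iff_mem_items dist e.2 e.1 hdk).mp hget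
  · exact hnv
  · intro p hp hp1
    have hg : dist.get? p.1 = some p.2 :=
      (PySem.Dict.get?_eq_some_iff_mem_items dist p.1 p.2 hdk).mpr hp
    rw [hp1, hget] at hg
    have : p.2 = e.1 := by injection hg with hh; exact hh.symm
    exact Prod.ext hp1 this
  · exact hlt
  · exact Or.inl rfl

-- the loop invariant: the visited sets coincide (same variable), every seen state is a
-- non-target member of the state space, every queued entry's state is in the state space,
-- the dict's keys are unique and, per unseen state, the dict holds exactly the least
-- queued heat for that state
def pvInv (grid : List (List Int)) (qa : List PvE) (seen : PySem.Set PvS)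
    (dist : PySem.Dict PvS Int) : Prop :=
  seen.Nodup ∧
  (∀ x ∈ seen, x ∈ pvStates grid ∧
    ¬(x.1 = (grid.length : Int) - 1 ∧ x.2.1 = pvWidth grid - 1)) ∧
  (∀ e ∈ qa, e.2 ∈ pvStates grid) ∧
  dist.keys.Nodup ∧
  (∀ x : PvS, x ∉ seen → dist.get? x = pvSMin qa x)

theorem pvLoop_eq (grid : List (List Int)) :
    ∀ (fa fb : Nat) (qa : List PvE) (seen : PySem.Set PvS) (dist : PySem.Dict PvS Int),
      pvInv grid qa seen dist →
      qa.length + 6 * ((pvStates grid).length - seen.length) < fa →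
      (pvStates grid).length - seen.length < fb →
      pvLoopA grid fa qa seen = pvLoopB grid fb dist seen := by
  intro fa
  induction fa with
  | zero => intro fb qa seen dist _ hfa _; omega
  | succ f ih =>
    intro fb qa seen dist hinv hfa hfb
    obtain ⟨hnd, hseen, hq, hdk, hcorr⟩ := hinv
    obtain ⟨fb', rfl⟩ : ∃ fb', fb = fb' + 1 := ⟨fb - 1, by omega⟩
    have hLseen : seen.length ≤ (pvStates grid).length :=
      pv_nodup_subset_len hnd fun x hx => (hseen x hx).1
    rcases hm : pvMinOf qa with _ | e
    · -- empty queue: both sides return -1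
      have hqe : qa = [] := pvMinOf_eq_none.mp hm
      subst hqe
      have hb : pvBestOf dist seen = none := by
        apply pvBestOf_none
        intro p hp
        by_cases hx : p.1 ∈ seen
        · exact hx
        · exfalso
          have hg : dist.get? p.1 = some p.2 :=
            (PySem.Dict.get?_eq_some_iff_mem_items dist p.1 p.2 hdk).mpr hp
          rw [hcorr p.1 hx] at hg
          cases hg
      simp only [pvLoopA, pvLoopB, hm, hb]
    · obtain ⟨hmem, hmin⟩ := pvMinOf_spec hm
      obtain ⟨eh, es⟩ := e
      have hsval : es ∈ pvStates grid := hq _ hmem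
      have hq1 : 1 ≤ qa.length := List.length_pos_of_mem hmem
      have hsmin : pvSMin qa es = some eh := by
        apply pvSMin_eq_some hmem
        intro h' hmem'
        have hfalse := hmin _ hmem'
        by_cases hc : h' < eh
        · rw [(pvLt6_same_state (s := es)).mpr hc] at hfalse; cases hfalse
        · omega
      have hbest_of_unseen : es ∉ seen → pvBestOf dist seen = some (eh, es) := by
        intro hnsv
        apply pvBestOf_eq hdk
        · rw [hcorr es hnsv]; exact hsmin
        · exact hnsv
        · intro p hp hpv hpne
          have hg : dist.get? p.1 = some p.2 :=
            (PySem.Dict.get?_eq_some_iff_mem_items dist p.1 p.2 hdk).mpr hp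
          rw [hcorr p.1 hpv] at hg
          have hq2 : (p.2, p.1) ∈ qa := pvSMin_mem hg
          have h1 : pvLt6 (p.2, p.1) (eh, es) = false := hmin _ hq2
          have hne : ((eh, es) : PvE) ≠ (p.2, p.1) := by
            intro hEq
            apply hpne
            have := congrArg Prod.snd hEq
            simpa using this.symm
          rcases pvLt6_total hne with hgood | hbad
          · exact hgood
          · rw [hbad] at h1; cases h1
      by_cases htar : es.1 = (grid.length : Int) - 1 ∧ es.2.1 = pvWidth grid - 1
      · -- the destination is popped: both sides return eh
        have hnsv : es ∉ seen := fun hx => (hseen es hx).2 htar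
        have hbest := hbest_of_unseen hnsv
        simp only [pvLoopA, pvLoopB, hm, hbest]
        rw [if_pos htar, if_pos htar]
      · by_cases hsv : es ∈ seen
        · -- a stale duplicate: A skips it, B is unchanged
          have hcont : PySem.Set.contains seen es = true := (PySem.Set.contains_iff _ _).mpr hsv
          have hinv' : pvInv grid (qa.erase (eh, es)) seen dist := by
            refine ⟨hnd, hseen, fun e' he' => hq e' (List.erase_subset he'), hdk, ?_⟩
            intro x hx
            rw [hcorr x hx]
            exact (pvSfold_erase (fun hEq => hx (by simpa [← hEq] using hsv)) qa none).symm
          have hlen : (qa.erase (eh, es)).length = qa.length - 1 :=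
            List.length_erase_of_mem hmem
          have := ih (fb' + 1) (qa.erase (eh, es)) seen dist hinv' (by omega) hfb
          simp only [pvLoopA, hm]
          rw [if_neg htar, if_pos hcont]
          exact this
        · -- a new state: A expands it, B selects it and relaxes
          have hbest := hbest_of_unseen hsv
          have hcont : ¬ PySem.Set.contains seen es = true := by
            rw [PySem.Set.contains_iff]; exact hsv
          have hadd : PySem.Set.add seen es = seen ++ [es] := PySem.Set.add_of_not_mem hsv
          have hxs_ne : ∀ x : PvS, x ∉ PySem.Set.add seen es → x ∉ seen ∧ x ≠ es := by
            intro x hx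
            rw [PySem.Set.mem_add] at hx
            exact ⟨fun hh => hx (Or.inl hh), fun hh => hx (Or.inr hh)⟩
          have hinv' : pvInv grid ((qa.erase (eh, es)) ++ pvPushesA grid eh es)
              (PySem.Set.add seen es) (pvRelax grid eh es (PySem.Set.add seen es) dist) := by
            refine ⟨PySem.Set.nodup_add _ _ hnd, ?_, ?_, ?_, ?_⟩
            · intro x hx
              rcases (PySem.Set.mem_add _ _ _).mp hx with hx' | rfl
              · exact hseen x hx'
              · exact ⟨hsval, htar⟩
            · intro e' he'
              rcases List.mem_append.mp he' with h1 | h1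
              · exact hq e' (List.erase_subset h1)
              · obtain ⟨dd, hdd, hc⟩ :=
                  List.mem_flatMap.mp ((pvPushes_perm hsval).mem_iff.mp h1)
                exact pvCand_state_valid hsval hdd hc
            · rw [pvRelax_eq]
              exact pvRelaxFold_nodup pvDirs dist hdk
            · intro x hx
              obtain ⟨hx1, hx2⟩ := hxs_ne x hx
              rw [pvRelax_eq,
                pvRelaxFold_get? grid eh es (PySem.Set.add seen es) (t := x) hx pvDirs dist,
                hcorr x hx1]
              rw [show pvSMin (qa.erase (eh, es) ++ pvPushesA grid eh es) x =
                (pvPushesA grid eh es).foldl (pvSStep x)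
                  ((qa.erase (eh, es)).foldl (pvSStep x) none) from by
                rw [pvSMin, List.foldl_append]]
              have hrest : (qa.erase (eh, es)).foldl (pvSStep x) none = pvSMin qa x :=
                pvSfold_erase (fun hEq => hx2 hEq.symm) qa none
              rw [hrest]
              exact (pvSfold_perm (pvPushes_perm hsval) (pvSMin qa x)).symm
          have hlen1 : (qa.erase (eh, es)).length = qa.length - 1 :=
            List.length_erase_of_mem hmem
          have hlen2 : (pvPushesA grid eh es).length ≤ 4 := pvPushes_len hsval
          have hslen : (PySem.Set.add seen es).length = seen.length + 1 := by
            rw [hadd, List.length_append, List.length_cons, List.length_nil]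
          have hsub' : seen.length + 1 ≤ (pvStates grid).length := by
            have hnd' : (PySem.Set.add seen es).Nodup := PySem.Set.nodup_add _ _ hnd
            have hsubset : (PySem.Set.add seen es) ⊆ pvStates grid := by
              intro x hx
              rcases (PySem.Set.mem_add _ _ _).mp hx with hx' | rfl
              · exact (hseen x hx').1
              · exact hsval
            have := pv_nodup_subset_len hnd' hsubset
            rwa [hslen] at this
          have hrec := ih fb' ((qa.erase (eh, es)) ++ pvPushesA grid eh es)
            (PySem.Set.add seen es) (pvRelax grid eh es (PySem.Set.add seen es) dist) hinv'
            (by rw [List.length_append]; omega) (by omega)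
          simp only [pvLoopA, pvLoopB, hm, hbest]
          rw [if_neg htar, if_neg hcont, if_neg htar]
          exact hrec

theorem pv_init_corr :
    ∀ x : PvS, x ∉ ([] : PySem.Set PvS) →
      (PySem.Dict.ofList [((((0:Int),(0:Int),(0:Int),(0:Int),(0:Int)) : PvS), (0:Int))]).get? x =
        pvSMin [((0:Int), (0:Int), (0:Int), (0:Int), (0:Int), (0:Int))] x := by
  intro x _
  by_cases hx0 : x = (((0:Int),(0:Int),(0:Int),(0:Int),(0:Int)) : PvS)
  · subst hx0
    rfl
  · have h1 : (PySem.Dict.ofList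
        [((((0:Int),(0:Int),(0:Int),(0:Int),(0:Int)) : PvS), (0:Int))]).get? x = none := by
      rw [show (PySem.Dict.ofList
          [((((0:Int),(0:Int),(0:Int),(0:Int),(0:Int)) : PvS), (0:Int))]) =
          (PySem.Dict.mk [((((0:Int),(0:Int),(0:Int),(0:Int),(0:Int)) : PvS), (0:Int))]) from rfl]
      rw [PySem.Dict.get?_mk_cons]
      have hcond2 : ¬((((((0:Int),(0:Int),(0:Int),(0:Int),(0:Int)) : PvS)) == x) = true) := by
        intro hbeq
        exact hx0 (eq_of_beq hbeq).symm
      rw [if_neg hcond2]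
      rfl
    rw [h1]
    show none = pvSStep x none ((0:Int), ((0:Int),(0:Int),(0:Int),(0:Int),(0:Int)))
    unfold pvSStep
    dsimp only
    have hcond : ¬((((0:Int),(0:Int),(0:Int),(0:Int),(0:Int)) : PvS) = x) :=
      fun hc => hx0 hc.symm
    rw [if_neg hcond]

theorem pv_main : ∀ (grid : List (List Int)), Pre_find_least_heat_loss grid →
    find_least_heat_loss grid = find_least_heat_loss_alt grid := by
  intro grid _
  unfold find_least_heat_loss find_least_heat_loss_alt pvFuelA pvFuelB
  apply pvLoop_eq
  · refine ⟨List.nodup_nil, ?_, ?_, ?_, ?_⟩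
    · intro x hx; cases hx
    · intro e he
      rcases List.mem_cons.mp he with rfl | h
      · exact List.mem_cons_self
      · cases h
    · exact PySem.Dict.nodup_keys_ofList _
    · exact pv_init_corr
  · simp only [List.length_cons, List.length_nil]
    omega
  · simp only [List.length_nil]
    omega

-- ===== VERDICT (by name: the statement is the Claim_ definition above) =====
theorem find_least_heat_loss_spec : Claim_equal_find_least_heat_loss := by
  intro grid _ hpre
  exact pv_main grid hpre
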